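-- pv_equiv track=rewrite | github.com/JuanSync7/RagWeave | src/knowledge_graph/query/context_formatter.py | _parse_triple_groups
-- ===== SOURCE A (Python) =====
-- from typing import TYPE_CHECKING, Dict, List, Optional, Tuple
--
-- def _parse_triple_groups(
--     triple_lines: List[str],
-- ) -> List[Tuple[str, List[str]]]:
--     """Parse flat triple_lines back into (heading, [member, ...]) tuples.
--
--     A heading line is one that does NOT start with ``"- "`` (it is the
--     bold predicate subheading produced by ``_format_relationship_triples``).
--
--     Parameters
--     ----------
--     triple_lines:
--         Lines as produced by ``_format_relationship_triples``.
--
--     Returns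
--     -------
--     List[Tuple[str, List[str]]]
--         List of ``(heading_line, [member_lines])`` pairs, in original order.
--     """
--     groups: List[Tuple[str, List[str]]] = []
--     current_heading: Optional[str] = None
--     current_members: List[str] = []
--
--     for line in triple_lines:
--         if not line.startswith("- "):
--             # New heading — save previous group if any.
--             if current_heading is not None:
--                 groups.append((current_heading, current_members))
--             current_heading = line
--             current_members = []
--         else:
--             current_members.append(line)
--
--     if current_heading is not None:
--         groups.append((current_heading, current_members))
--
--     return groups
-- ===== SOURCE B (Python) =====
-- from typing import List, Tuple
--
--
-- def _parse_triple_groups(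
--     triple_lines: List[str],
-- ) -> List[Tuple[str, List[str]]]:
--     groups: List[Tuple[str, List[str]]] = []
--     n = len(triple_lines)
--     i = 0
--     # Member lines before the first heading are discarded.
--     while i < n and triple_lines[i].startswith("- "):
--         i += 1
--     while i < n:
--         heading = triple_lines[i]
--         j = i + 1
--         while j < n and triple_lines[j].startswith("- "):
--             j += 1
--         groups.append((heading, triple_lines[i + 1:j]))
--         i = j
--     return groups
-- ===== Notes on version B (the rewrite author's own statement) =====
-- stated objective: alternative
-- what changed: Replaced the single accumulator loop carrying (groups, current_heading, current_members) state with a block decomposition: repeatedly split off a heading and its run of leading member lines, with no pending-group state to flush at the end.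
import Mathlib
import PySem

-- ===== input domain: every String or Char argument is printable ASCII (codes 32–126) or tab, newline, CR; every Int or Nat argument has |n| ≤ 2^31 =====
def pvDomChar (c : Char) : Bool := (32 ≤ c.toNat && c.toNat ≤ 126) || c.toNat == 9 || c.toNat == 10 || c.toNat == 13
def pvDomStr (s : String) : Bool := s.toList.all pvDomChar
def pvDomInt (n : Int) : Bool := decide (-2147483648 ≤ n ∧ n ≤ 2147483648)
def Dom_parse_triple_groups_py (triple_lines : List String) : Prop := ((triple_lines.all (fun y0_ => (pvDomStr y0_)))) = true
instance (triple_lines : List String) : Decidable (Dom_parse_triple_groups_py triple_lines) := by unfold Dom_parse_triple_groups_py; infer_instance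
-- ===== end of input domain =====

-- B replaces A's single accumulator loop over (groups, current_heading, current_members)
-- by a block decomposition that repeatedly splits off a heading and its run of member lines
-- (objective: alternative decomposition, same cost).


-- ===== PORT A =====
-- A's for-loop, carrying (groups, current_heading, current_members)
def pvLoopA : List String → List (String × List String) → Option String → List String →
    List (String × List String) × Option String × List String
  | [], groups, cur, mems => (groups, cur, mems)
  | line :: rest, groups, cur, mems =>
    if !(PySem.Str.startswith line "- ") then
      match cur with
      | some h => pvLoopA rest (groups ++ [(h, mems)]) (some line) []
      | none => pvLoopA rest groups (some line) []
    else
      pvLoopA rest groups cur (mems ++ [line])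

def parse_triple_groups_py (triple_lines : List String) : List (String × List String) :=
  let s := pvLoopA triple_lines [] none []
  -- final flush: if current_heading is not None, append (current_heading, current_members)
  match s.2.1 with
  | some h => s.1 ++ [(h, s.2.2)]
  | none => s.1

-- ===== PORT B =====
-- B walks the list with indices i, j over triple_lines[i..]; here each index loop is
-- rendered exactly as recursion over the corresponding suffix (drop), the inner
-- counting loop 'while j < n and startswith' is pvCountMembers, and the slice
-- triple_lines[i+1:j] is take of that count (exact: 0 <= count <= len).
def pvCountMembers : List String → Nat
  | [] => 0
  | l :: ls => if PySem.Str.startswith l "- " then pvCountMembers ls + 1 else 0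

def pvSplitMembers (lines : List String) : List String × List String :=
  (lines.take (pvCountMembers lines), lines.drop (pvCountMembers lines))

-- B's outer 'while i < n' loop on the suffix starting at the current heading
def pvLoopB : List String → List (String × List String)
  | [] => []
  | heading :: tail =>
    (heading, (pvSplitMembers tail).1) :: pvLoopB (pvSplitMembers tail).2
termination_by l => l.length
decreasing_by
  simp [pvSplitMembers]

def parse_triple_groups_py_alt (triple_lines : List String) : List (String × List String) :=
  -- the leading skip loop: drop the members before the first heading
  pvLoopB (pvSplitMembers triple_lines).2

-- ===== PRECONDITION & SPEC =====
def Spec_parse_triple_groups_py (triple_lines : List String) (out : List (String × List String)) : Prop := out = parse_triple_groups_py_alt triple_lines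
instance (triple_lines : List String) (out : List (String × List String)) : Decidable (Spec_parse_triple_groups_py triple_lines out) := by unfold Spec_parse_triple_groups_py; infer_instance

-- ===== CLAIM (what is proved, stated in full; the proofs are below) =====
def Claim_equal_parse_triple_groups_py : Prop := ∀ (triple_lines : List String), Dom_parse_triple_groups_py triple_lines → Spec_parse_triple_groups_py triple_lines (parse_triple_groups_py triple_lines)

-- ===== LEMMAS AND PROOFS =====

def pvIsMem (l : String) : Bool := PySem.Str.startswith l "- "

def pvFinishA (s : List (String × List String) × Option String × List String) :
    List (String × List String) :=
  match s.2.1 with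
  | some h => s.1 ++ [(h, s.2.2)]
  | none => s.1

theorem pvSplitMembers_eq (ls : List String) :
    pvSplitMembers ls = (ls.takeWhile pvIsMem, ls.dropWhile pvIsMem) := by
  induction ls with
  | nil => rfl
  | cons l ls ih =>
    have ih1 := congrArg Prod.fst ih
    have ih2 := congrArg Prod.snd ih
    simp only [pvSplitMembers] at ih1 ih2
    cases h : PySem.Chars.startswith l.toList ['-', ' '] <;>
      simp [pvSplitMembers, pvCountMembers, List.takeWhile, List.dropWhile, pvIsMem, h, ih1, ih2]

theorem pvLoopB_nil : pvLoopB [] = [] := by rw [pvLoopB.eq_def]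

theorem pvLoopB_cons (h : String) (tail : List String) :
    pvLoopB (h :: tail) =
      (h, tail.takeWhile pvIsMem) :: pvLoopB (tail.dropWhile pvIsMem) := by
  rw [pvLoopB.eq_def]
  simp [pvSplitMembers_eq]

theorem pvLoopA_some (ls : List String) :
    ∀ (groups : List (String × List String)) (h : String) (mems : List String),
    pvFinishA (pvLoopA ls groups (some h) mems) =
      groups ++ (h, mems ++ ls.takeWhile pvIsMem) :: pvLoopB (ls.dropWhile pvIsMem) := by
  induction ls with
  | nil => intro groups h mems; simp [pvLoopA, pvFinishA, pvLoopB_nil]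
  | cons line rest ih =>
    intro groups h mems
    cases hl : PySem.Chars.startswith line.toList ['-', ' '] <;>
      simp [pvLoopA, List.takeWhile, List.dropWhile, pvIsMem, hl, ih, pvLoopB_cons]

theorem pvLoopA_none (ls : List String) :
    ∀ (groups : List (String × List String)) (mems : List String),
    pvFinishA (pvLoopA ls groups none mems) = groups ++ pvLoopB (ls.dropWhile pvIsMem) := by
  induction ls with
  | nil => intro groups mems; simp [pvLoopA, pvFinishA, pvLoopB_nil]
  | cons line rest ih =>
    intro groups mems
    cases hl : PySem.Chars.startswith line.toList ['-', ' '] <;>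
      simp [pvLoopA, List.dropWhile, pvIsMem, hl, ih, pvLoopA_some, pvLoopB_cons]

-- ===== VERDICT (by name: the statement is the Claim_ definition above) =====
theorem parse_triple_groups_py_spec : Claim_equal_parse_triple_groups_py := by
  intro triple_lines _
  unfold Spec_parse_triple_groups_py parse_triple_groups_py parse_triple_groups_py_alt
  rw [pvSplitMembers_eq]
  have := pvLoopA_none triple_lines [] []
  simpa [pvFinishA] using this
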